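-- pv_equiv track=rewrite | github.com/ji1kang/coding-test-notebook | 프로그래머스/lv1-135808-과일장수.py | solution
-- ===== SOURCE A (Python) =====
-- def solution(k, m, score):
--     """
--     ! 상자에 못담는 건 버림
--     1,000,000 = nlog
--     """
--
--     n = len(score)
--     score = sorted(score, reverse=True)
--     num_box = n // m
--     score = score[:min(n, num_box * m)]
--     n = len(score)
--
--     answer = 0 # 이익이 없는 경우
--
--     for i in range(n-1, -1, -1 * (m)):
--         answer += (score[i] * m)
--
--
--     return answer
-- ===== SOURCE B (Python) =====
-- def solution(k, m, score):
--     counts = {}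
--     for s in score:
--         counts[s] = counts.get(s, 0) + 1
--     q = len(score) // m
--     total = 0
--     pos = 0
--     for v in sorted(counts, reverse=True):
--         c = counts[v]
--         total += v * (min((pos + c) // m, q) - min(pos // m, q))
--         pos += c
--     return m * total
-- ===== Notes on version B (the rewrite author's own statement) =====
-- stated objective: alternative
-- what changed: B never sorts or slices the full score list: it builds a frequency dictionary in one pass, sorts only the distinct values, and for each value's run computes arithmetically (via floor divisions of the running position) how many box-minimum slots the run covers, instead of A's full descending sort plus backward stride-m indexing.
import Mathlib
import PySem

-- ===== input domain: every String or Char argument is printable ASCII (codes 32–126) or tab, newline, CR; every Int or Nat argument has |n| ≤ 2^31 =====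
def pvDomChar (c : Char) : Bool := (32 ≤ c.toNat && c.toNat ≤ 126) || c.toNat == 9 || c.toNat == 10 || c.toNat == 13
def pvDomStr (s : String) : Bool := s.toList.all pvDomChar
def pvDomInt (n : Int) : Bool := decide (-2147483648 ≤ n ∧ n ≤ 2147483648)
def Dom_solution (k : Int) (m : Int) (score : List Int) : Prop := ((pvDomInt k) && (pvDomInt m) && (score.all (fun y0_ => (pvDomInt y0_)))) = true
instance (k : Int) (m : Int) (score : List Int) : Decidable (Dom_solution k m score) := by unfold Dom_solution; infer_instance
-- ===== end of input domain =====

-- B replaces A's full descending sort + stride indexing by a frequency dictionary: it sorts only the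
-- DISTINCT scores and computes each value's contribution to the box-minimum sum arithmetically.

-- ===== PORT A =====
def solution (k : Int) (m : Int) (score : List Int) : Int :=
  let n : Int := PySem.List.len score
  let score1 := PySem.List.sorted score (fun x => x) true
  let numBox : Int := PySem.Int.floordiv n m
  let score2 := PySem.List.slice score1 none (some (min n (numBox * m)))
  let n2 : Int := PySem.List.len score2
  (PySem.List.pyRange (n2 - 1) (-1) (-1 * m)).foldl
    (fun answer i => answer + PySem.List.pyGetD score2 i 0 * m) 0

-- ===== PORT B =====
def solution_alt (k : Int) (m : Int) (score : List Int) : Int :=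
  let counts := score.foldl (fun d s => d.insert s (d.getD s 0 + 1)) PySem.Dict.empty
  let q : Int := PySem.Int.floordiv (PySem.List.len score) m
  let res := (PySem.List.sorted counts.keys (fun x => x) true).foldl
    (fun (tp : Int × Int) v =>
      let c := counts.getD v 0
      (tp.1 + v * (min (PySem.Int.floordiv (tp.2 + c) m) q - min (PySem.Int.floordiv tp.2 m) q),
       tp.2 + c))
    (0, 0)
  m * res.1

-- ===== PRECONDITION & SPEC =====
-- Pre_ excludes only m = 0, where the Python A raises ZeroDivisionError (n // m).
def Pre_solution (k : Int) (m : Int) (score : List Int) : Prop := m ≠ 0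
instance (k : Int) (m : Int) (score : List Int) : Decidable (Pre_solution k m score) := by unfold Pre_solution; infer_instance
def pvWitness_solution : Int × Int × List Int := (4, 2, [1, 4, 2, 5, 3])
def Spec_solution (k : Int) (m : Int) (score : List Int) (out : Int) : Prop := out = solution_alt k m score
instance (k : Int) (m : Int) (score : List Int) (out : Int) : Decidable (Spec_solution k m score out) := by unfold Spec_solution; infer_instance

-- ===== CLAIM (what is proved, stated in full; the proofs are below) =====
def Claim_equal_solution : Prop := ∀ (k : Int) (m : Int) (score : List Int), Dom_solution k m score → Pre_solution k m score → Spec_solution k m score (solution k m score)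

-- ===== LEMMAS AND PROOFS =====

-- The body of B's loop, with the counter dict already replaced by score.count.
def altStep (score : List Int) (m q : Int) (tp : Int × Int) (v : Int) : Int × Int :=
  (tp.1 + v * (min (PySem.Int.floordiv (tp.2 + (score.count v : Int)) m) q
             - min (PySem.Int.floordiv tp.2 m) q),
   tp.2 + (score.count v : Int))

-- Selected-box-minimum sum over a window of the descending list, offset a.
def Tsum (m q a : Int) (L : List Int) : Int :=
  ∑ j ∈ Finset.range q.toNat,
    if a ≤ m * (j : Int) + m - 1 ∧ m * (j : Int) + m - 1 < a + (L.length : Int)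
    then L.getD (m * (j : Int) + m - 1 - a).toNat 0 else 0

-- q = n // m with m < 0 bounds every x // m from below, for x ≤ n.
lemma q_le_floordiv {n m x : Int} (hm : m < 0) (hx : x ≤ n) :
    PySem.Int.floordiv n m ≤ PySem.Int.floordiv x m := by
  have h1 := PySem.Int.floordiv_mul_add_mod n m
  have h2 := PySem.Int.floordiv_mul_add_mod x m
  have h3 := PySem.Int.mod_neg_bounds n hm
  have h4 := PySem.Int.mod_neg_bounds x hm
  by_contra h
  push_neg at h
  nlinarith [h3.1, h3.2, h4.1, h4.2]

-- With m < 0, every term of B's loop is zero.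
lemma fold_neg (score : List Int) (m : Int) (hm : m < 0) :
    ∀ (vs : List Int) (a t : Int), 0 ≤ a →
      a + ((vs.map (fun v => (score.count v : Int))).sum) ≤ (score.length : Int) →
      (vs.foldl (altStep score m (PySem.Int.floordiv (score.length : Int) m)) (t, a)).1 = t := by
  intro vs
  induction vs with
  | nil => intro a t _ _; rfl
  | cons v vs ih =>
    intro a t ha hbound
    have hc : (0 : Int) ≤ (score.count v : Int) := Int.natCast_nonneg _
    have hrest : (0 : Int) ≤ ((vs.map (fun v => (score.count v : Int))).sum) := by
      apply List.sum_nonneg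
      intro x hx
      obtain ⟨w, _, rfl⟩ := List.mem_map.mp hx
      exact Int.natCast_nonneg _
    simp only [List.map_cons, List.sum_cons] at hbound
    have hbound' : a + (score.count v : Int) + ((vs.map (fun v => (score.count v : Int))).sum) ≤ (score.length : Int) := by linarith
    have h1 : min (PySem.Int.floordiv (a + (score.count v : Int)) m) (PySem.Int.floordiv (score.length : Int) m) = PySem.Int.floordiv (score.length : Int) m :=
      min_eq_right (q_le_floordiv hm (by linarith))
    have h2 : min (PySem.Int.floordiv a m) (PySem.Int.floordiv (score.length : Int) m) = PySem.Int.floordiv (score.length : Int) m :=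
      min_eq_right (q_le_floordiv hm (by linarith))
    simp only [List.foldl_cons, altStep, h1, h2, sub_self, mul_zero, add_zero]
    exact ih (a + (score.count v : Int)) t (by linarith) hbound'

-- Sum of an indicator of an integer interval over range N.
lemma sum_indicator (v : Int) : ∀ (N : Nat) (lo hi : Int), 0 ≤ lo → lo ≤ hi →
    (∑ j ∈ Finset.range N, if lo ≤ (j : Int) ∧ (j : Int) < hi then v else 0)
      = v * (min hi (N : Int) - min lo (N : Int)) := by
  intro N
  induction N with
  | zero =>
    intro lo hi hlo hlh
    simp only [Finset.range_zero, Finset.sum_empty, Nat.cast_zero]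
    have e1 : min hi (0 : Int) = 0 := by omega
    have e2 : min lo (0 : Int) = 0 := by omega
    rw [e1, e2]; ring
  | succ N ih =>
    intro lo hi hlo hlh
    rw [Finset.sum_range_succ, ih lo hi hlo hlh]
    by_cases hcase : hi ≤ (N : Int)
    · rw [if_neg (by push_cast; omega)]
      have e1 : min hi ((N : Int) + 1) = min hi (N : Int) := by omega
      have e2 : min lo ((N : Int) + 1) = min lo (N : Int) := by omega
      push_cast
      rw [e1, e2]; ring
    · by_cases hlocase : lo ≤ (N : Int)
      · rw [if_pos (by push_cast; omega)]
        have e1 : min hi (N : Int) = (N : Int) := by omega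
        have e2 : min hi ((N : Int) + 1) = (N : Int) + 1 := by omega
        have e3 : min lo ((N : Int) + 1) = min lo (N : Int) := by omega
        push_cast
        rw [e1, e2, e3]; ring
      · rw [if_neg (by push_cast; omega)]
        have e1 : min hi (N : Int) = (N : Int) := by omega
        have e2 : min lo (N : Int) = (N : Int) := by omega
        have e3 : min hi ((N : Int) + 1) = (N : Int) + 1 := by omega
        have e4 : min lo ((N : Int) + 1) = (N : Int) + 1 := by omega
        push_cast
        rw [e1, e2, e3, e4]; ring

-- Summing (if v = x then c else 0) over a duplicate-free list.
lemma sum_ite_count (score : List Int) (x : Int) :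
    ∀ (vs : List Int), vs.Nodup →
      (vs.map (fun v => if v = x then score.count x else 0)).sum
        = if x ∈ vs then score.count x else 0 := by
  intro vs
  induction vs with
  | nil => intro _; simp
  | cons v vs ih =>
    intro h
    obtain ⟨hv, hvs⟩ := List.nodup_cons.mp h
    simp only [List.map_cons, List.sum_cons, ih hvs, List.mem_cons]
    by_cases hvx : v = x
    · subst hvx
      simp [hv]
    · rw [if_neg hvx, zero_add]
      by_cases hx : x ∈ vs
      · rw [if_pos hx, if_pos (Or.inr hx)]
      · rw [if_neg hx, if_neg (by rintro (h | h); exact hvx h.symm; exact hx h)]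

-- The descending sort is the concatenation of the runs of its distinct values.
lemma desc_eq_runs (score : List Int) :
    PySem.List.sorted score (fun x => x) true
      = (PySem.List.sorted (PySem.Set.ofList score) (fun x => x) true).flatMap
          (fun v => List.replicate (score.count v) v) := by
  apply List.Perm.eq_of_pairwise (le := fun a b : Int => b ≤ a)
  · exact fun a b _ _ h1 h2 => le_antisymm h2 h1
  · exact PySem.List.sorted_pairwise_rev score _
  · refine List.pairwise_flatMap.mpr ⟨fun a _ => List.pairwise_replicate.mpr (Or.inr le_rfl), ?_⟩
    refine (PySem.List.sorted_pairwise_rev (PySem.Set.ofList score) _).imp ?_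
    intro a b hba x hx y hy
    rw [List.eq_of_mem_replicate hx, List.eq_of_mem_replicate hy]
    exact hba
  · refine (PySem.List.sorted_perm score _ _).trans ?_
    rw [List.perm_iff_count]
    intro x
    rw [List.count_flatMap]
    have hkeys_nodup : (PySem.List.sorted (PySem.Set.ofList score) (fun x => x) true).Nodup :=
      (PySem.List.sorted_perm _ _ _).nodup_iff.mpr (PySem.Set.nodup_ofList score)
    have hmem : x ∈ PySem.List.sorted (PySem.Set.ofList score) (fun x => x) true ↔ x ∈ score := by
      rw [PySem.List.mem_sorted, PySem.Set.mem_ofList]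
    have hmap : ((PySem.List.sorted (PySem.Set.ofList score) (fun x => x) true).map
          (List.count x ∘ fun v => List.replicate (score.count v) v))
        = (PySem.List.sorted (PySem.Set.ofList score) (fun x => x) true).map
            (fun v => if v = x then score.count x else 0) := by
      apply List.map_congr_left
      intro v _
      simp only [Function.comp_apply, List.count_replicate, beq_iff_eq]
      by_cases h : v = x
      · subst h; simp
      · simp [h]
    rw [hmap, sum_ite_count score x _ hkeys_nodup]
    by_cases hx : x ∈ score
    · rw [if_pos (hmem.mpr hx)]
    · rw [if_neg (fun hc => hx (hmem.mp hc)), List.count_eq_zero.mpr hx]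

-- Window sum over a run of c copies of v followed by L: the run contributes its box-minimum count.
lemma Tsum_rep_append (m q a : Int) (hm : 0 < m) (hq : 0 ≤ q) (ha : 0 ≤ a) (c : Nat) (v : Int) (L : List Int) :
    Tsum m q a (List.replicate c v ++ L)
      = v * (min (PySem.Int.floordiv (a + (c : Int)) m) q - min (PySem.Int.floordiv a m) q)
        + Tsum m q (a + (c : Int)) L := by
  have hfd1 : PySem.Int.floordiv a m = a / m := PySem.Int.floordiv_eq_ediv_of_pos hm
  have hfd2 : PySem.Int.floordiv (a + (c : Int)) m = (a + (c : Int)) / m := PySem.Int.floordiv_eq_ediv_of_pos hm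
  have hlo0 : 0 ≤ min (a / m) q := le_min (Int.ediv_nonneg ha hm.le) hq
  have hlh : min (a / m) q ≤ min ((a + (c : Int)) / m) q :=
    min_le_min (Int.ediv_le_ediv hm (by omega)) le_rfl
  have hsplit : ∀ j ∈ Finset.range q.toNat,
      (if a ≤ m * (j : Int) + m - 1 ∧ m * (j : Int) + m - 1 < a + ((List.replicate c v ++ L).length : Int)
       then (List.replicate c v ++ L).getD (m * (j : Int) + m - 1 - a).toNat 0 else 0)
      = (if min (a / m) q ≤ (j : Int) ∧ (j : Int) < min ((a + (c : Int)) / m) q then v else 0)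
        + (if a + (c : Int) ≤ m * (j : Int) + m - 1 ∧ m * (j : Int) + m - 1 < a + (c : Int) + (L.length : Int)
           then L.getD (m * (j : Int) + m - 1 - (a + (c : Int))).toNat 0 else 0) := by
    intro j hj
    have hjq : (j : Int) < q := by
      have := Finset.mem_range.mp hj
      omega
    have hp0 : 0 ≤ m * (j : Int) + m - 1 := by
      have := mul_nonneg hm.le (Int.natCast_nonneg j)
      omega
    have e : ((j : Int) + 1) * m = m * (j : Int) + m := by ring
    have hA : a ≤ m * (j : Int) + m - 1 ↔ a / m ≤ (j : Int) := by
      rw [show (a / m ≤ (j : Int)) ↔ a / m < (j : Int) + 1 from by omega,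
          Int.ediv_lt_iff_lt_mul hm, e]
      omega
    have hB : ∀ x : Int, m * (j : Int) + m - 1 < x ↔ (j : Int) < x / m := by
      intro x
      rw [show ((j : Int) < x / m) ↔ (j : Int) + 1 ≤ x / m from by omega,
          Int.le_ediv_iff_mul_le hm, e]
      omega
    have hBc := hB (a + (c : Int))
    rw [List.length_append, List.length_replicate]
    generalize hpd : m * (j : Int) + m - 1 = p at hA hB hBc hp0 ⊢
    by_cases h1 : a ≤ p
    · by_cases h2 : p < a + (c : Int)
      · -- inside the run
        rw [if_pos ⟨h1, by push_cast; omega⟩,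
            if_pos ⟨le_trans (min_le_left _ _) (hA.mp h1), lt_min (hBc.mp h2) hjq⟩,
            if_neg (by omega),
            List.getD_append _ _ _ _ (by simp [List.length_replicate]; omega)]
        rw [List.getD_replicate _ (by omega)]
        ring
      · -- past the run
        have hind : ¬ (min (a / m) q ≤ (j : Int) ∧ (j : Int) < min ((a + (c : Int)) / m) q) := by
          rintro ⟨-, hhi⟩
          exact h2 (hBc.mpr (lt_of_lt_of_le hhi (min_le_left _ _)))
        by_cases h3 : p < a + (c : Int) + (L.length : Int)
        · rw [if_pos ⟨h1, by push_cast; omega⟩, if_neg hind, if_pos ⟨by omega, h3⟩,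
              List.getD_append_right _ _ _ _ (by simp [List.length_replicate]; omega)]
          rw [List.length_replicate, show (p - a).toNat - c = (p - (a + (c : Int))).toNat from by omega]
          ring
        · rw [if_neg (by push_cast; omega), if_neg hind, if_neg (by omega)]
          ring
    · -- before the run
      have hind : ¬ (min (a / m) q ≤ (j : Int) ∧ (j : Int) < min ((a + (c : Int)) / m) q) := by
        rintro ⟨hlo, -⟩
        rcases le_total (a / m) q with hle | hle
        · rw [min_eq_left hle] at hlo
          exact h1 (hA.mpr hlo)
        · rw [min_eq_right hle] at hlo
          omega
      rw [if_neg (by push_cast; omega), if_neg hind, if_neg (by omega)]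
      ring
  unfold Tsum
  rw [Finset.sum_congr rfl hsplit, Finset.sum_add_distrib, hfd1, hfd2,
      sum_indicator v q.toNat _ _ hlo0 hlh,
      Int.toNat_of_nonneg hq,
      min_eq_left (min_le_right ((a + (c : Int)) / m) q),
      min_eq_left (min_le_right (a / m) q)]

-- B's loop, started at offset a, accumulates exactly the window sum Tsum.
lemma fold_runs (score : List Int) (m : Int) (hm : 0 < m) :
    ∀ (vs : List Int) (a t : Int), 0 ≤ a →
      (vs.foldl (altStep score m (PySem.Int.floordiv (score.length : Int) m)) (t, a)).1
        = t + Tsum m (PySem.Int.floordiv (score.length : Int) m) a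
            (vs.flatMap (fun v => List.replicate (score.count v) v)) := by
  have hq : 0 ≤ PySem.Int.floordiv (score.length : Int) m := by
    rw [PySem.Int.floordiv_eq_ediv_of_pos hm]
    exact Int.ediv_nonneg (Int.natCast_nonneg _) hm.le
  intro vs
  induction vs with
  | nil =>
    intro a t ha
    have htz : Tsum m (PySem.Int.floordiv (score.length : Int) m) a [] = 0 := by
      unfold Tsum
      refine Finset.sum_eq_zero fun j _ => if_neg ?_
      rintro ⟨h1, h2⟩
      simp only [List.length_nil, Nat.cast_zero, add_zero] at h2
      exact absurd (lt_of_le_of_lt h1 h2) (lt_irrefl _)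
    simp only [List.foldl_nil, List.flatMap_nil, htz, add_zero]
  | cons v vs ih =>
    intro a t ha
    have hc : (0 : Int) ≤ (score.count v : Int) := Int.natCast_nonneg _
    simp only [List.foldl_cons, List.flatMap_cons]
    show (vs.foldl _ (altStep score m _ (t, a) v)).1 = _
    simp only [altStep]
    rw [ih (a + (score.count v : Int)) _ (by linarith),
        Tsum_rep_append _ _ a hm hq ha (score.count v) v _]
    ring

-- range(a, b, s) for a negative step s, unfolded to its count-and-map form.
lemma pyRange_neg_eq (a b s : Int) (hs : s < 0) :
    PySem.List.pyRange a b s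
      = (List.range (if b < a then ((a - b + -s - 1) / -s).toNat else 0)).map
          (fun k : Nat => a + s * (k : Int)) := by
  unfold PySem.List.pyRange
  rw [if_neg hs.ne, if_neg (not_lt.mpr hs.le)]

-- A list sum over List.range is the Finset sum.
lemma list_sum_range (f : Nat → Int) : ∀ N : Nat, ((List.range N).map f).sum = ∑ j ∈ Finset.range N, f j := by
  intro N
  induction N with
  | zero => simp
  | succ N ih =>
    rw [List.range_succ, List.map_append, List.sum_append, Finset.sum_range_succ, ih]
    simp

-- A, for 0 < m, equals m times the sum of every m-th element of the descending sort.
lemma solution_eq_Tsum (k m : Int) (score : List Int) (hm : 0 < m) :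
    solution k m score
      = m * Tsum m (PySem.Int.floordiv (score.length : Int) m) 0
          (PySem.List.sorted score (fun x => x) true) := by
  simp only [solution, PySem.List.len_eq]
  set s := PySem.List.sorted score (fun x => x) true with hsdef
  have hslen : (s.length : Int) = (score.length : Int) := by
    rw [hsdef, PySem.List.length_sorted]
  set q : Int := PySem.Int.floordiv (score.length : Int) m with hqdef
  have hq' : q = (score.length : Int) / m := PySem.Int.floordiv_eq_ediv_of_pos hm
  have hq0 : 0 ≤ q := by
    rw [hq']
    exact Int.ediv_nonneg (Int.natCast_nonneg _) hm.le
  have hqm : q * m ≤ (score.length : Int) := by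
    rw [hq']
    exact Int.ediv_mul_le _ hm.ne'
  rw [min_eq_right hqm, PySem.List.slice_to _ (mul_nonneg hq0 hm.le)]
  have hqm0 : (0 : Int) ≤ q * m := mul_nonneg hq0 hm.le
  have hlen2 : (((List.take (q * m).toNat s).length : Nat) : Int) = q * m := by
    simp only [List.length_take]
    omega
  rw [hlen2]
  by_cases hq1 : q = 0
  · -- no full box: the loop range and the Tsum range are both empty
    rw [pyRange_neg_eq _ _ _ (by linarith : -1 * m < 0),
        if_neg (by rw [hq1]; omega : ¬ ((-1 : Int) < q * m - 1))]
    have htz : Tsum m q 0 s = 0 := by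
      unfold Tsum
      rw [hq1]
      simp
    rw [htz]
    simp
  · -- q ≥ 1
    have hq1' : 1 ≤ q := by omega
    rw [pyRange_neg_eq _ _ _ (by linarith : -1 * m < 0),
        if_pos (by nlinarith : (-1 : Int) < q * m - 1)]
    have hcnt : ((q * m - 1 - -1 + -(-1 * m) - 1) / -(-1 * m)).toNat = q.toNat := by
      have e1 : q * m - 1 - -1 + -(-1 * m) - 1 = (m - 1) + q * m := by ring
      have e2 : -(-1 * m) = m := by ring
      rw [e1, e2, Int.add_mul_ediv_right _ _ hm.ne',
          Int.ediv_eq_zero_of_lt (by omega) (by omega), zero_add]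
    rw [hcnt, List.foldl_map, PySem.List.foldl_add, zero_add, list_sum_range]
    -- reduce to equality of the two Finset sums
    have hTs : Tsum m q 0 s
        = ∑ j ∈ Finset.range q.toNat, s.getD (m * (j : Int) + m - 1).toNat 0 := by
      unfold Tsum
      refine Finset.sum_congr rfl fun j hj => ?_
      have hjq : (j : Int) < q := by
        have := Finset.mem_range.mp hj
        omega
      have hp0 : 0 ≤ m * (j : Int) + m - 1 := by
        have := mul_nonneg hm.le (Int.natCast_nonneg j)
        omega
      have hpn : m * (j : Int) + m - 1 < (s.length : Int) := by
        have h1 : m * ((j : Int) + 1) ≤ m * q := by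
          apply mul_le_mul_of_nonneg_left (by omega) hm.le
        rw [hslen]
        nlinarith
      rw [if_pos ⟨by omega, by omega⟩, sub_zero]
    have hsum : (∑ kk ∈ Finset.range q.toNat,
          PySem.List.pyGetD (List.take (q * m).toNat s) (q * m - 1 + -1 * m * (kk : Int)) 0)
        = ∑ j ∈ Finset.range q.toNat, s.getD (m * (j : Int) + m - 1).toNat 0 := by
      rw [← Finset.sum_range_reflect (fun j => s.getD (m * (j : Int) + m - 1).toNat 0) q.toNat]
      refine Finset.sum_congr rfl fun kk hkk => ?_
      have hkkq : (kk : Int) < q := by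
        have := Finset.mem_range.mp hkk
        omega
      have hkk0 : 0 ≤ (kk : Int) := Int.natCast_nonneg _
      have hidx : q * m - 1 + -1 * m * (kk : Int) = m * ((q.toNat - 1 - kk : Nat) : Int) + m - 1 := by
        have : ((q.toNat - 1 - kk : Nat) : Int) = q - 1 - (kk : Int) := by omega
        rw [this]
        ring
      have hi0 : 0 ≤ q * m - 1 + -1 * m * (kk : Int) := by nlinarith
      have hilt : q * m - 1 + -1 * m * (kk : Int) < q * m := by nlinarith
      have hlt : (q * m - 1 + -1 * m * (kk : Int)) < ((List.take (q * m).toNat s).length : Int) := by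
        rw [hlen2]
        exact hilt
      have hidxlt : (m * ((q.toNat - 1 - kk : Nat) : Int) + m - 1).toNat < s.length := by
        rw [← hidx]
        omega
      rw [PySem.List.pyGetD_eq_getElem _ 0 hi0 hlt, List.getElem_take,
          List.getD_eq_getElem _ _ hidxlt]
      simp only [hidx]
    rw [← Finset.sum_mul, hsum, hTs]
    exact mul_comm _ _

theorem solution_eq_alt (k m : Int) (score : List Int) (hm : m ≠ 0) :
    solution k m score = solution_alt k m score := by
  have hkeys : (PySem.List.sorted (PySem.Set.ofList score) (fun x => x) true).Perm score.dedup :=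
    (PySem.List.sorted_perm _ _ _).trans
      ((List.perm_ext_iff_of_nodup (PySem.Set.nodup_ofList score) (List.nodup_dedup score)).mpr
        (fun a => by rw [PySem.Set.mem_ofList, List.mem_dedup]))
  have hsum : (((PySem.List.sorted (PySem.Set.ofList score) (fun x => x) true).map
        (fun v => (score.count v : Int))).sum) = (score.length : Int) := by
    rw [(hkeys.map _).sum_eq,
        show (fun v => ((score.count v : Nat) : Int)) = (Nat.cast ∘ fun v => score.count v) from rfl,
        ← List.map_map, ← Nat.cast_list_sum, List.sum_map_count_dedup_eq_length]
  simp only [solution_alt, PySem.List.len_eq, PySem.Dict.foldl_insert_getD_add_one_eq_counter,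
    PySem.Dict.getD_counter, PySem.Dict.keys_counter]
  show solution k m score
      = m * ((PySem.List.sorted (PySem.Set.ofList score) (fun x => x) true).foldl
          (altStep score m (PySem.Int.floordiv ((score.length : Nat) : Int) m)) (0, 0)).1
  rcases lt_or_gt_of_ne hm with hneg | hpos
  · -- m < 0 : A's loop range is empty and every term of B's loop is zero
    rw [fold_neg score m hneg _ 0 0 le_rfl (by rw [hsum, zero_add]), mul_zero]
    simp only [solution, PySem.List.len_eq]
    rw [PySem.List.pyRange_of_pos _ _ (by linarith : (0 : Int) < -1 * m)]
    have h0 : (0 : Int) ≤ ((PySem.List.slice (PySem.List.sorted score (fun x => x) true) none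
        (some (min ((score.length : Nat) : Int) (PySem.Int.floordiv ((score.length : Nat) : Int) m * m)))).length : Int) :=
      Int.natCast_nonneg _
    rw [if_neg (by omega)]
    simp
  · -- 0 < m : both sides equal m * Tsum over the descending sort
    rw [solution_eq_Tsum k m score hpos,
        fold_runs score m hpos _ 0 0 le_rfl, zero_add, ← desc_eq_runs score]

-- ===== VERDICT (by name: the statement is the Claim_ definition above) =====
theorem solution_spec : Claim_equal_solution := by
  intro k m score _ hpre
  unfold Spec_solution
  exact solution_eq_alt k m score hpre
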